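-- pv_equiv track=rewrite | github.com/KelvinChi/LeetcodeBank | 747_largest_number_at_least_twice_of_others.py | lnaltoo
-- ===== SOURCE A (Python) =====
-- def lnaltoo(lis):
--     biggest = max(lis)
--     ind = lis.index(biggest)
--     lis.pop(ind)
--     for i in lis:
--         if 2 * i > biggest:
--             return -1
--     else:
--         return ind
-- ===== SOURCE B (Python) =====
-- def lnaltoo(lis):
--     # one pass maintaining the two largest values (and the first index of the max),
--     # then the same pop(ind) mutation as A
--     ind = 0
--     first = lis[0]
--     second = None
--     for i, v in enumerate(lis[1:], 1):
--         if v > first: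
--             second = first
--             first = v
--             ind = i
--         elif second is None or v > second:
--             second = v
--     lis.pop(ind)
--     return ind if second is None or 2 * second <= first else -1
-- ===== Notes on version B (the rewrite author's own statement) =====
-- stated objective: alternative
-- what changed: A computes max(lis), its index, pops it, then runs a separate verification loop over the remainder; B is a single enumerate pass maintaining the running max, its first index, and the second-largest value, deciding with one comparison 2*second <= first.
-- outside the precondition, e.g. on lnaltoo([]): A raises ValueError, B raises IndexError
import Mathlib
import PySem

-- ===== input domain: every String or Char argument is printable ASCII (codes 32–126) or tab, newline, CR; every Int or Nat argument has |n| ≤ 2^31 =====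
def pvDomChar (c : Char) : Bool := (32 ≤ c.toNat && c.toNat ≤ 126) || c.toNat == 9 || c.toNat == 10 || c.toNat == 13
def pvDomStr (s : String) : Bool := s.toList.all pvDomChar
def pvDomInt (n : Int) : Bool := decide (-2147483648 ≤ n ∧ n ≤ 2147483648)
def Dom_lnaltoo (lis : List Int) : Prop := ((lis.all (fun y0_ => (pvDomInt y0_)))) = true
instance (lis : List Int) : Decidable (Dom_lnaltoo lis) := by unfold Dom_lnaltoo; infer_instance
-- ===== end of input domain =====

-- B replaces A's three scans (max, index, final check loop) by a single pass keeping the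
-- two largest values; both A and B pop the max from `lis` in Python (same mutation),
-- the equivalence proved here is about the return value.

-- ===== PORT A =====
-- A's final for-loop: return -1 on the first i with 2*i > biggest, else ind
def lnaltooLoopA (rest : List Int) (biggest ind : Int) : Int :=
  match rest with
  | [] => ind
  | i :: t => if 2 * i > biggest then -1 else lnaltooLoopA t biggest ind

def lnaltoo (lis : List Int) : Int :=
  match PySem.List.max? lis (fun y => y) with
  | none => 0              -- max([]) raises ValueError: excluded by Pre_
  | some biggest =>
    match PySem.List.index? lis biggest with
    | none => 0            -- unreachable: biggest ∈ lis
    | some ind =>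
      match PySem.List.pop? lis (ind : Int) with
      | none => 0          -- unreachable: ind < len(lis)
      | some (_, rest) => lnaltooLoopA rest biggest (ind : Int)

-- ===== PORT B =====
-- one step of B's loop: state (ind, first, second), item (i, v) from enumerate(lis[1:], 1)
def lnaltooStepB (st : Int × Int × Option Int) (p : Int × Int) : Int × Int × Option Int :=
  if p.2 > st.2.1 then (p.1, p.2, some st.2.1)
  else if (match st.2.2 with | none => true | some s => decide (p.2 > s)) then
    (st.1, st.2.1, some p.2)
  else st

def lnaltoo_alt (lis : List Int) : Int :=
  match lis with
  | [] => 0                -- lis[0] raises IndexError: excluded by Pre_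
  | x :: t =>
    let st := (PySem.List.enumerate t 1).foldl lnaltooStepB ((0 : Int), x, (none : Option Int))
    -- (lis.pop(ind) in Source B only mutates; no effect on the return value)
    match st.2.2 with
    | none => st.1
    | some second => if 2 * second ≤ st.2.1 then st.1 else -1

-- ===== PRECONDITION & SPEC =====
-- Pre_ excludes exactly the empty list, on which A raises ValueError (max([])).
def Pre_lnaltoo (lis : List Int) : Prop := lis ≠ []
instance (lis : List Int) : Decidable (Pre_lnaltoo lis) := by unfold Pre_lnaltoo; infer_instance
def pvWitness_lnaltoo : List Int := [5, 2, 1]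

def Spec_lnaltoo (lis : List Int) (out : Int) : Prop := out = lnaltoo_alt lis
instance (lis : List Int) (out : Int) : Decidable (Spec_lnaltoo lis out) := by unfold Spec_lnaltoo; infer_instance

-- ===== CLAIM (what is proved, stated in full; the proofs are below) =====
def Claim_equal_lnaltoo : Prop := ∀ (lis : List Int), Dom_lnaltoo lis → Pre_lnaltoo lis → Spec_lnaltoo lis (lnaltoo lis)

-- ===== LEMMAS AND PROOFS =====

-- idxOf? of a member is some idxOf
theorem idxOf?_of_mem (l : List Int) (a : Int) (h : a ∈ l) :
    List.idxOf? a l = some (List.idxOf a l) := by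
  induction l with
  | nil => simp at h
  | cons x t ih =>
    by_cases hx : x = a
    · simp [hx, List.idxOf?_cons]
    · have ht : a ∈ t := by
        rcases List.mem_cons.mp h with h1 | h1
        · exact absurd h1.symm hx
        · exact h1
      simp [List.idxOf?_cons, hx, ih ht, beq_iff_eq, Option.map]

-- max? of a list-append by one element
theorem max?_append_singleton (ys : List Int) (v : Int) :
    (ys ++ [v]).max? = some (match ys.max? with | none => v | some s => max s v) := by
  cases ys with
  | nil => simp [List.max?]
  | cons y t =>
    rw [List.cons_append, List.max?_cons', List.max?_cons', List.foldl_append]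
    simp

-- the fold invariant: after the whole pass, B's state is
-- (first index of the max, the max, max? of the list with that index erased)
theorem lnaltoo_fold_inv (t : List Int) (x : Int) :
    (PySem.List.enumerate t 1).foldl lnaltooStepB ((0 : Int), x, (none : Option Int))
      = ((List.idxOf (t.foldl max x) (x :: t) : Int), t.foldl max x,
         ((x :: t).eraseIdx (List.idxOf (t.foldl max x) (x :: t))).max?) := by
  induction t using List.reverseRecOn with
  | nil => simp [PySem.List.enumerate_nil, List.idxOf_cons_self]
  | append_singleton t' v ih =>
    rw [PySem.List.enumerate_append, List.foldl_append, ih]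
    have hmax : (x :: t').max? = some (t'.foldl max x) := List.max?_cons'
    have hub : ∀ b ∈ x :: t', b ≤ t'.foldl max x :=
      fun b hb => ((List.max?_le_iff hmax).mp (le_refl _)) b hb
    have hmem : t'.foldl max x ∈ x :: t' := List.max?_mem hmax
    have hk : List.idxOf (t'.foldl max x) (x :: t') < (x :: t').length :=
      List.idxOf_lt_length_iff.mpr hmem
    have hcons : x :: (t' ++ [v]) = (x :: t') ++ [v] := by simp
    have hfold : (t' ++ [v]).foldl max x = max (t'.foldl max x) v := by
      simp [List.foldl_append]
    rw [PySem.List.enumerate_cons, PySem.List.enumerate_nil]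
    by_cases hv : v > t'.foldl max x
    · have hnm : v ∉ x :: t' := fun hc => absurd (hub v hc) (by omega)
      have hidx : List.idxOf (max (t'.foldl max x) v) (x :: (t' ++ [v])) = (x :: t').length := by
        rw [hcons, max_eq_right (le_of_lt hv), List.idxOf_append]
        simp [hnm, List.idxOf_cons_self]
      have herase : (x :: (t' ++ [v])).eraseIdx (x :: t').length = x :: t' := by
        rw [hcons, List.eraseIdx_append_of_length_le (le_refl _)]
        simp
      rw [List.foldl_cons, List.foldl_nil, hfold, hidx, max_eq_right (le_of_lt hv), herase, hmax]
      show lnaltooStepB _ _ = _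
      rw [lnaltooStepB]
      rw [if_pos (by simpa using hv)]
      exact Prod.ext (by simp; omega) rfl
    · have hvm : v ≤ t'.foldl max x := by omega
      have hidx : List.idxOf (max (t'.foldl max x) v) (x :: (t' ++ [v]))
          = List.idxOf (t'.foldl max x) (x :: t') := by
        rw [hcons, max_eq_left hvm, List.idxOf_append]
        simp [hmem]
      have herase : (x :: (t' ++ [v])).eraseIdx (List.idxOf (t'.foldl max x) (x :: t'))
          = (x :: t').eraseIdx (List.idxOf (t'.foldl max x) (x :: t')) ++ [v] := by
        rw [hcons, List.eraseIdx_append_of_lt_length hk]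
      rw [List.foldl_cons, List.foldl_nil, hfold, hidx, max_eq_left hvm, herase,
        max?_append_singleton]
      show lnaltooStepB _ _ = _
      rw [lnaltooStepB]
      rw [if_neg (by simpa using hv)]
      cases hsec : ((x :: t').eraseIdx (List.idxOf (t'.foldl max x) (x :: t'))).max? with
      | none => simp
      | some s =>
        by_cases hvs : v > s
        · simp [hvs, max_eq_right (le_of_lt hvs)]
        · simp [hvs, max_eq_left (by omega : v ≤ s)]

-- A's loop returns -1 iff some remaining element i has 2*i > biggest
theorem lnaltooLoopA_eq (rest : List Int) (b ind : Int) :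
    lnaltooLoopA rest b ind = if rest.any (fun i => 2 * i > b) then -1 else ind := by
  induction rest with
  | nil => simp [lnaltooLoopA]
  | cons i t ih =>
    simp only [lnaltooLoopA, List.any_cons, ih]
    by_cases h : 2 * i > b <;> simp [h]

-- ===== VERDICT (by name: the statement is the Claim_ definition above) =====
theorem lnaltoo_spec : Claim_equal_lnaltoo := by
  intro lis _ hpre
  unfold Spec_lnaltoo
  match lis with
  | [] => exact absurd rfl hpre
  | x :: t =>
    have hmax : (x :: t).max? = some (t.foldl max x) := List.max?_cons'
    have hub : ∀ b ∈ x :: t, b ≤ t.foldl max x :=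
      fun b hb => ((List.max?_le_iff hmax).mp (le_refl _)) b hb
    have hmem : t.foldl max x ∈ x :: t := List.max?_mem hmax
    have hk : List.idxOf (t.foldl max x) (x :: t) < (x :: t).length :=
      List.idxOf_lt_length_iff.mpr hmem
    simp only [lnaltoo, PySem.List.max?_id_cons, PySem.List.index?_eq_idxOf?,
      idxOf?_of_mem _ _ hmem, PySem.List.pop?_natCast _ _ hk, lnaltooLoopA_eq]
    rw [lnaltoo_alt]
    simp only [lnaltoo_fold_inv]
    cases hsec : ((x :: t).eraseIdx (List.idxOf (t.foldl max x) (x :: t))).max? with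
    | none =>
      have : (x :: t).eraseIdx (List.idxOf (t.foldl max x) (x :: t)) = [] :=
        List.max?_eq_none_iff.mp hsec
      simp [this]
    | some s =>
      have hsmem : s ∈ (x :: t).eraseIdx (List.idxOf (t.foldl max x) (x :: t)) :=
        List.max?_mem hsec
      have hsub : ∀ b ∈ (x :: t).eraseIdx (List.idxOf (t.foldl max x) (x :: t)), b ≤ s :=
        fun b hb => ((List.max?_le_iff hsec).mp (le_refl _)) b hb
      by_cases hc : 2 * s ≤ t.foldl max x
      · have hany : ((x :: t).eraseIdx (List.idxOf (t.foldl max x) (x :: t))).any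
            (fun i => 2 * i > t.foldl max x) = false := by
          simp only [List.any_eq_false]
          intro i hi
          have := hsub i hi
          simp only [decide_eq_true_eq, not_lt]
          omega
        rw [hany]
        simp [hc]
      · have hany : ((x :: t).eraseIdx (List.idxOf (t.foldl max x) (x :: t))).any
            (fun i => 2 * i > t.foldl max x) = true := by
          simp only [List.any_eq_true]
          exact ⟨s, hsmem, by simp; omega⟩
        rw [hany]
        simp [hc]
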